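-- pv_equiv track=rewrite | github.com/papostolopoulos/Scraper | scraper/jobminer/comp_norm.py | map_benefits
-- ===== SOURCE A (Python) =====
-- from typing import Dict, List, Optional, Tuple
--
-- def map_benefits(raw_benefits: List[str], mapping: Dict[str, List[str]]) -> List[str]:
--     if not raw_benefits:
--         return []
--     canon_hits = set()
--     for raw in raw_benefits:
--         low = raw.lower().strip()
--         for canon, variants in mapping.items():
--             if low == canon or low in variants:
--                 canon_hits.add(canon)
--             else:
--                 # containment heuristic (avoid overmatching very short tokens)
--                 if len(low) > 5:
--                     for v in variants:
--                         if len(v) > 5 and v in low: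
--                             canon_hits.add(canon)
--                             break
--     return sorted(canon_hits)
-- ===== SOURCE B (Python) =====
-- def map_benefits(raw_benefits, mapping):
--     # Precompute two indexes once: an exact-lookup table mapping each canonical
--     # name and each variant string to the canonical names it belongs to, and a
--     # flat list of the long (len > 5) variants for the containment heuristic.
--     exact = {}
--     long_pats = []
--     for canon, variants in mapping.items():
--         for key in [canon] + variants:
--             exact.setdefault(key, []).append(canon)
--         for v in variants:
--             if len(v) > 5:
--                 long_pats.append((v, canon))
--     hits = set()
--     for raw in raw_benefits:
--         low = raw.lower().strip()
--         if low in exact: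
--             hits.update(exact[low])
--         if len(low) > 5:
--             for v, canon in long_pats:
--                 if v in low:
--                     hits.add(canon)
--     return sorted(hits)
-- ===== Notes on version B (the rewrite author's own statement) =====
-- stated objective: faster
-- what changed: B precomputes two indexes in one pass over the mapping - a hash table from every canonical name and variant string to its canonical names (so the exact/membership test becomes one dict lookup instead of scanning all entries and variants per raw) and a flat list of only the long (len>5) variants for the containment heuristic - then makes a single pass over the raws.
import Mathlib
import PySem

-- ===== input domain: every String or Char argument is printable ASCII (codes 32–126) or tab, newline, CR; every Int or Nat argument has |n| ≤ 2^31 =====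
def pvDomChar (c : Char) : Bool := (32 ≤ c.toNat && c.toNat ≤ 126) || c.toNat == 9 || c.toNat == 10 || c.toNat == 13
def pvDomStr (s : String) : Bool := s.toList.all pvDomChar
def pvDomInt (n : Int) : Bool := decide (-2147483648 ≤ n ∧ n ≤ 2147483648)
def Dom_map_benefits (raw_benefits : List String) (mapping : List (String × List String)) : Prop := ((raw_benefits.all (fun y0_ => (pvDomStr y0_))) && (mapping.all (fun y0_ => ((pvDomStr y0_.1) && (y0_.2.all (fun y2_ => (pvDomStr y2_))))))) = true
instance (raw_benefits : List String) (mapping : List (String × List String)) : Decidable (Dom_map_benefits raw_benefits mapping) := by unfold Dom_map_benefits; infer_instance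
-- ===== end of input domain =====

-- B precomputes an exact-lookup index (string → canonical names) and a flat list of the long
-- variants, replacing A's per-raw scan of the whole mapping by a dict lookup plus a scan of
-- the precomputed long patterns only; same results.

-- ===== PORT A =====
def map_benefits (raw_benefits : List String) (mapping : List (String × List String)) : List String :=
  if raw_benefits = [] then []
  else
    let canon_hits : PySem.Set String :=
      raw_benefits.foldl (fun acc raw =>
        let low := PySem.Str.strip (PySem.Str.lower raw)
        mapping.foldl (fun acc2 cv =>
          if low == cv.1 || cv.2.contains low then PySem.Set.add acc2 cv.1
          else
            if decide (5 < PySem.Str.len low) then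
              -- 'for v in variants: if …: add; break' = add iff some variant matches
              if cv.2.any (fun v => decide (5 < PySem.Str.len v) && PySem.Str.isIn v low)
              then PySem.Set.add acc2 cv.1 else acc2
            else acc2) acc) PySem.Set.empty
    PySem.List.sorted canon_hits (fun x => x) false

-- ===== PORT B =====
-- 'exact.setdefault(key, []).append(canon)' = insert key (getD key [] ++ [canon]) (same
-- position/order semantics); building 'exact' and 'long_pats' in one loop over mapping is the
-- paired fold below.
def map_benefits_alt (raw_benefits : List String) (mapping : List (String × List String)) : List String :=
  let idx :=
    mapping.foldl (fun (st : PySem.Dict String (List String) × List (String × String)) cv =>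
      ((cv.1 :: cv.2).foldl (fun d key => d.insert key (d.getD key [] ++ [cv.1])) st.1,
       cv.2.foldl (fun l v => if decide (5 < PySem.Str.len v) then l ++ [(v, cv.1)] else l) st.2))
      (PySem.Dict.empty, [])
  let hits : PySem.Set String :=
    raw_benefits.foldl (fun h raw =>
      let low := PySem.Str.strip (PySem.Str.lower raw)
      let h' := if idx.1.contains low then PySem.Set.update h (idx.1.getD low []) else h
      if decide (5 < PySem.Str.len low) then
        idx.2.foldl (fun h2 p => if PySem.Str.isIn p.1 low then PySem.Set.add h2 p.2 else h2) h'
      else h') PySem.Set.empty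
  PySem.List.sorted hits (fun x => x) false

-- ===== PRECONDITION & SPEC =====
def Spec_map_benefits (raw_benefits : List String) (mapping : List (String × List String)) (out : List String) : Prop := out = map_benefits_alt raw_benefits mapping
instance (raw_benefits : List String) (mapping : List (String × List String)) (out : List String) : Decidable (Spec_map_benefits raw_benefits mapping out) := by unfold Spec_map_benefits; infer_instance

-- ===== CLAIM (what is proved, stated in full; the proofs are below) =====
def Claim_equal_map_benefits : Prop := ∀ (raw_benefits : List String) (mapping : List (String × List String)), Dom_map_benefits raw_benefits mapping → Spec_map_benefits raw_benefits mapping (map_benefits raw_benefits mapping)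

-- ===== LEMMAS AND PROOFS =====

-- the combined match test of A's inner loop body
def pyHit (low canon : String) (variants : List String) : Bool :=
  low == canon || variants.contains low ||
  (decide (5 < PySem.Str.len low) &&
    variants.any (fun v => decide (5 < PySem.Str.len v) && PySem.Str.isIn v low))

-- generic 'if p then add else skip' fold over a set: membership and nodup
theorem mem_foldl_addIf {β : Type} (l : List β) (p : β → Bool) (g : β → String)
    (acc : PySem.Set String) (x : String) :
    x ∈ l.foldl (fun a b => if p b then PySem.Set.add a (g b) else a) acc ↔
      x ∈ acc ∨ ∃ b ∈ l, p b = true ∧ x = g b := by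
  induction l generalizing acc with
  | nil => simp
  | cons hd tl ih =>
    simp only [List.foldl_cons, ih, List.mem_cons]
    by_cases h : p hd <;> (simp [h, PySem.Set.mem_add]; try tauto)

theorem nodup_foldl_addIf {β : Type} (l : List β) (p : β → Bool) (g : β → String)
    (acc : PySem.Set String) (h : acc.Nodup) :
    (l.foldl (fun a b => if p b then PySem.Set.add a (g b) else a) acc).Nodup := by
  induction l generalizing acc with
  | nil => exact h
  | cons hd tl ih =>
    simp only [List.foldl_cons]
    apply ih
    by_cases hp : p hd
    · simpa [hp] using PySem.Set.nodup_add acc (g hd) h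
    · simpa [hp] using h

-- the inner fold of A's port is the single-test fold with test 'pyHit'
theorem inner_step_eq (low : String) :
    (fun (acc2 : PySem.Set String) (cv : String × List String) =>
      if low == cv.1 || cv.2.contains low then PySem.Set.add acc2 cv.1
      else
        if decide (5 < PySem.Str.len low) then
          if cv.2.any (fun v => decide (5 < PySem.Str.len v) && PySem.Str.isIn v low)
          then PySem.Set.add acc2 cv.1 else acc2
        else acc2)
    = (fun acc2 cv => if pyHit low cv.1 cv.2 then PySem.Set.add acc2 cv.1 else acc2) := by
  funext acc2 cv
  unfold pyHit
  cases h1 : (low == cv.1 || cv.2.contains low) <;>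
    cases h2 : decide (5 < PySem.Str.len low) <;>
      cases h3 : cv.2.any (fun v => decide (5 < PySem.Str.len v) && PySem.Str.isIn v low) <;>
        simp_all

theorem mem_A_fold (raw_benefits : List String) (mapping : List (String × List String))
    (acc : PySem.Set String) (x : String) :
    x ∈ raw_benefits.foldl (fun acc raw =>
        mapping.foldl (fun acc2 cv =>
          if pyHit ((PySem.Str.strip (PySem.Str.lower raw))) cv.1 cv.2 then PySem.Set.add acc2 cv.1 else acc2) acc) acc ↔
      x ∈ acc ∨ ∃ raw ∈ raw_benefits, ∃ cv ∈ mapping, pyHit ((PySem.Str.strip (PySem.Str.lower raw))) cv.1 cv.2 = true ∧ x = cv.1 := by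
  induction raw_benefits generalizing acc with
  | nil => simp
  | cons hd tl ih =>
    simp only [List.foldl_cons, ih, List.mem_cons]
    rw [mem_foldl_addIf]
    constructor
    · rintro ((hx | ⟨cv, hcv, hp, rfl⟩) | ⟨raw, hraw, hQ⟩)
      · exact Or.inl hx
      · exact Or.inr ⟨hd, Or.inl rfl, cv, hcv, hp, rfl⟩
      · exact Or.inr ⟨raw, Or.inr hraw, hQ⟩
    · rintro (hx | ⟨raw, (rfl | hraw), hQ⟩)
      · exact Or.inl (Or.inl hx)
      · exact Or.inl (Or.inr hQ)
      · exact Or.inr ⟨raw, hraw, hQ⟩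

theorem nodup_A_fold (raw_benefits : List String) (mapping : List (String × List String))
    (acc : PySem.Set String) (h : acc.Nodup) :
    (raw_benefits.foldl (fun acc raw =>
        mapping.foldl (fun acc2 cv =>
          if pyHit ((PySem.Str.strip (PySem.Str.lower raw))) cv.1 cv.2 then PySem.Set.add acc2 cv.1 else acc2) acc) acc).Nodup := by
  induction raw_benefits generalizing acc with
  | nil => exact h
  | cons hd tl ih =>
    exact ih _ (nodup_foldl_addIf _ _ _ _ h)

-- B side: the exact-lookup index.  One mapping entry's key loop:
theorem getD_exact_entry (ks : List String) (c : String)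
    (d : PySem.Dict String (List String)) (s x : String) :
    x ∈ (ks.foldl (fun d key => d.insert key (d.getD key [] ++ [c])) d).getD s [] ↔
      x ∈ d.getD s [] ∨ (s ∈ ks ∧ x = c) := by
  induction ks generalizing d with
  | nil => simp
  | cons k t ih =>
    simp only [List.foldl_cons, ih, PySem.Dict.getD_insert, List.mem_cons]
    by_cases hk : s = k <;> simp [hk] <;> tauto

-- the whole exact-index fold
theorem getD_exact (mapping : List (String × List String))
    (d : PySem.Dict String (List String)) (s x : String) :
    x ∈ (mapping.foldl (fun d cv =>
          (cv.1 :: cv.2).foldl (fun d key => d.insert key (d.getD key [] ++ [cv.1])) d) d).getD s [] ↔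
      x ∈ d.getD s [] ∨ ∃ cv ∈ mapping, (s = cv.1 ∨ s ∈ cv.2) ∧ x = cv.1 := by
  induction mapping generalizing d with
  | nil => simp
  | cons cv t ih =>
    have h0 : ((cv :: t).foldl (fun d cv =>
          (cv.1 :: cv.2).foldl (fun d key => d.insert key (d.getD key [] ++ [cv.1])) d) d)
        = t.foldl (fun d cv =>
          (cv.1 :: cv.2).foldl (fun d key => d.insert key (d.getD key [] ++ [cv.1])) d)
          ((cv.1 :: cv.2).foldl (fun d key => d.insert key (d.getD key [] ++ [cv.1])) d) := rfl
    rw [h0, ih, getD_exact_entry]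
    simp only [List.mem_cons]
    constructor
    · rintro ((hx | ⟨hs, rfl⟩) | ⟨cw, hcw, hQ⟩)
      · exact Or.inl hx
      · exact Or.inr ⟨cv, Or.inl rfl, hs, rfl⟩
      · exact Or.inr ⟨cw, Or.inr hcw, hQ⟩
    · rintro (hx | ⟨cw, (rfl | hcw), hQ⟩)
      · exact Or.inl (Or.inl hx)
      · exact Or.inl (Or.inr hQ)
      · exact Or.inr ⟨cw, hcw, hQ⟩

-- the long-pattern list is the filtered flatMap of the mapping
theorem long_pats_eq (mapping : List (String × List String)) (init : List (String × String)) :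
    mapping.foldl (fun l cv =>
        cv.2.foldl (fun l v => if decide (5 < PySem.Str.len v) then l ++ [(v, cv.1)] else l) l) init =
      init ++ mapping.flatMap (fun cv =>
        (cv.2.filter (fun v => decide (5 < PySem.Str.len v))).map (fun v => (v, cv.1))) := by
  rw [PySem.List.foldl_congr_mem
    (g := fun l cv => l ++ (cv.2.filter (fun v => decide (5 < PySem.Str.len v))).map (fun v => (v, cv.1)))]
  · exact PySem.List.foldl_append_eq_flatMap _ _ _
  · intro acc cv _
    exact PySem.List.foldl_append_if _ _ _ _

-- one raw's step of B's hit loop, membership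
theorem mem_B_step (E : PySem.Dict String (List String)) (LPS : List (String × String))
    (h : PySem.Set String) (low x : String) :
    x ∈ (if decide (5 < PySem.Str.len low) then
          LPS.foldl (fun h2 p => if PySem.Str.isIn p.1 low then PySem.Set.add h2 p.2 else h2)
            (if E.contains low then PySem.Set.update h (E.getD low []) else h)
        else (if E.contains low then PySem.Set.update h (E.getD low []) else h)) ↔
      x ∈ h ∨ x ∈ E.getD low [] ∨
        (5 < PySem.Str.len low ∧ ∃ p ∈ LPS, PySem.Str.isIn p.1 low = true ∧ x = p.2) := by
  have hmem : x ∈ (if E.contains low then PySem.Set.update h (E.getD low []) else h) ↔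
      x ∈ h ∨ x ∈ E.getD low [] := by
    by_cases hc : E.contains low
    · simp [hc, PySem.Set.mem_update]
    · rw [PySem.Dict.getD_of_not_contains _ _ (by simpa using hc)]
      simp [hc]
  by_cases hl : 5 < PySem.Str.len low
  · rw [if_pos (by simpa using hl), mem_foldl_addIf, hmem]
    simp only [hl, true_and]
    tauto
  · rw [if_neg (by simpa using hl), hmem]
    simp only [hl, false_and, or_false]

theorem nodup_B_step (E : PySem.Dict String (List String)) (LPS : List (String × String))
    (h : PySem.Set String) (low : String) (hh : h.Nodup) :
    (if decide (5 < PySem.Str.len low) then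
        LPS.foldl (fun h2 p => if PySem.Str.isIn p.1 low then PySem.Set.add h2 p.2 else h2)
          (if E.contains low then PySem.Set.update h (E.getD low []) else h)
      else (if E.contains low then PySem.Set.update h (E.getD low []) else h)).Nodup := by
  have h1 : (if E.contains low then PySem.Set.update h (E.getD low []) else h).Nodup := by
    by_cases hc : E.contains low
    · simpa [hc] using PySem.Set.nodup_update h _ hh
    · simpa [hc] using hh
  by_cases hl : 5 < PySem.Str.len low
  · rw [if_pos (by simpa using hl)]; exact nodup_foldl_addIf _ _ _ _ h1
  · rw [if_neg (by simpa using hl)]; exact h1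

-- B's whole hit loop, membership and nodup
theorem mem_B_fold (raw_benefits : List String) (E : PySem.Dict String (List String))
    (LPS : List (String × String)) (acc : PySem.Set String) (x : String) :
    x ∈ raw_benefits.foldl (fun h raw =>
        if decide (5 < PySem.Str.len (PySem.Str.strip (PySem.Str.lower raw))) then
          LPS.foldl (fun h2 p =>
              if PySem.Str.isIn p.1 (PySem.Str.strip (PySem.Str.lower raw)) then PySem.Set.add h2 p.2 else h2)
            (if E.contains (PySem.Str.strip (PySem.Str.lower raw)) then
              PySem.Set.update h (E.getD (PySem.Str.strip (PySem.Str.lower raw)) []) else h)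
        else (if E.contains (PySem.Str.strip (PySem.Str.lower raw)) then
              PySem.Set.update h (E.getD (PySem.Str.strip (PySem.Str.lower raw)) []) else h)) acc ↔
      x ∈ acc ∨ ∃ raw ∈ raw_benefits,
        x ∈ E.getD (PySem.Str.strip (PySem.Str.lower raw)) [] ∨
        (5 < PySem.Str.len (PySem.Str.strip (PySem.Str.lower raw)) ∧
          ∃ p ∈ LPS, PySem.Str.isIn p.1 (PySem.Str.strip (PySem.Str.lower raw)) = true ∧ x = p.2) := by
  induction raw_benefits generalizing acc with
  | nil => simp
  | cons hd tl ih =>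
    simp only [List.foldl_cons, ih, List.mem_cons]
    rw [mem_B_step]
    constructor
    · rintro ((hx | hQ) | ⟨raw, hraw, hQ⟩)
      · exact Or.inl hx
      · exact Or.inr ⟨hd, Or.inl rfl, hQ⟩
      · exact Or.inr ⟨raw, Or.inr hraw, hQ⟩
    · rintro (hx | ⟨raw, (rfl | hraw), hQ⟩)
      · exact Or.inl (Or.inl hx)
      · exact Or.inl (Or.inr hQ)
      · exact Or.inr ⟨raw, hraw, hQ⟩

theorem nodup_B_fold (raw_benefits : List String) (E : PySem.Dict String (List String))
    (LPS : List (String × String)) (acc : PySem.Set String) (h : acc.Nodup) :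
    (raw_benefits.foldl (fun h raw =>
        if decide (5 < PySem.Str.len (PySem.Str.strip (PySem.Str.lower raw))) then
          LPS.foldl (fun h2 p =>
              if PySem.Str.isIn p.1 (PySem.Str.strip (PySem.Str.lower raw)) then PySem.Set.add h2 p.2 else h2)
            (if E.contains (PySem.Str.strip (PySem.Str.lower raw)) then
              PySem.Set.update h (E.getD (PySem.Str.strip (PySem.Str.lower raw)) []) else h)
        else (if E.contains (PySem.Str.strip (PySem.Str.lower raw)) then
              PySem.Set.update h (E.getD (PySem.Str.strip (PySem.Str.lower raw)) []) else h)) acc).Nodup := by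
  induction raw_benefits generalizing acc with
  | nil => exact h
  | cons hd tl ih =>
    simp only [List.foldl_cons]
    exact ih _ (nodup_B_step E LPS acc (PySem.Str.strip (PySem.Str.lower hd)) h)

-- ===== VERDICT (by name: the statement is the Claim_ definition above) =====
set_option maxHeartbeats 1000000 in
theorem map_benefits_spec : Claim_equal_map_benefits := by
  intro raw_benefits mapping _
  simp only [Spec_map_benefits, map_benefits, map_benefits_alt]
  rw [PySem.List.foldl_prod_mk
    (f := fun (d : PySem.Dict String (List String)) (cv : String × List String) =>
      (cv.1 :: cv.2).foldl (fun d key => d.insert key (d.getD key [] ++ [cv.1])) d)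
    (g := fun (l : List (String × String)) (cv : String × List String) =>
      cv.2.foldl (fun l v => if decide (5 < PySem.Str.len v) then l ++ [(v, cv.1)] else l) l)]
  by_cases h : raw_benefits = []
  · subst h
    rw [if_pos rfl]
    symm
    rw [PySem.List.sorted_eq_nil_iff]
    rfl
  · simp only [h, if_false]
    simp only [inner_step_eq]
    apply PySem.List.sorted_eq_sorted_of_perm _ _ _ (fun a b hab => hab)
    rw [List.perm_ext_iff_of_nodup
      (nodup_A_fold raw_benefits mapping PySem.Set.empty List.nodup_nil)
      (nodup_B_fold raw_benefits _ _ PySem.Set.empty List.nodup_nil)]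
    intro a
    rw [mem_A_fold, mem_B_fold]
    simp only [PySem.Set.empty, List.not_mem_nil, false_or]
    apply exists_congr; intro raw
    apply and_congr_right; intro _
    rw [getD_exact, long_pats_eq]
    simp only [PySem.Dict.getD_empty, List.not_mem_nil, false_or, List.nil_append,
      List.mem_flatMap, List.mem_map, List.mem_filter]
    unfold pyHit
    constructor
    · rintro ⟨cv, hcv, hhit, rfl⟩
      simp only [Bool.or_eq_true, Bool.and_eq_true, beq_iff_eq, List.contains_eq_mem,
        decide_eq_true_eq, List.any_eq_true] at hhit
      rcases hhit with ((he | hm) | ⟨hlen, v, hv, hvlen, hin⟩)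
      · exact Or.inl ⟨cv, hcv, Or.inl he, rfl⟩
      · exact Or.inl ⟨cv, hcv, Or.inr hm, rfl⟩
      · exact Or.inr ⟨hlen, (v, cv.1), ⟨cv, hcv, v, ⟨hv, decide_eq_true hvlen⟩, rfl⟩, hin, rfl⟩
    · rintro (⟨cv, hcv, hor, rfl⟩ | ⟨hlen, p, hp, hin, rfl⟩)
      · refine ⟨cv, hcv, ?_, rfl⟩
        simp only [Bool.or_eq_true, beq_iff_eq, List.contains_eq_mem, decide_eq_true_eq]
        exact Or.inl hor
      · obtain ⟨cv, hcv, v, ⟨hv, hvlen⟩, rfl⟩ := hp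
        refine ⟨cv, hcv, ?_, rfl⟩
        simp only [Bool.or_eq_true, Bool.and_eq_true, beq_iff_eq, List.contains_eq_mem,
          decide_eq_true_eq, List.any_eq_true]
        exact Or.inr ⟨hlen, v, hv, of_decide_eq_true hvlen, hin⟩
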